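-- pv_equiv track=rewrite | github.com/lucaslarson25/reach | scenes/arms/arm_discovery.py | _group_sites_by_arm
-- ===== SOURCE A (Python) =====
-- EE_SITE_PATTERNS = (
--     "gripper", "eetip", "hand", "attachment", "pin_site", "tool0", "ee", "ee_site",
--     "end_effector",
-- )
--
-- EE_SITE_EXCLUDE = ("left_finger", "right_finger", "/finger")
--
-- def _is_ee_site(name: str) -> bool:
--     """Return True if site name looks like an end-effector (excludes finger sub-sites)."""
--     lower = name.lower()
--     if any(ex in lower for ex in EE_SITE_EXCLUDE):
--         return False
--     return any(p in lower for p in EE_SITE_PATTERNS)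
--
-- def _group_sites_by_arm(site_names: list[str]) -> list[list[str]]:
--     """
--     Group EE site names by arm prefix (left/, right/, arm0/, etc.).
--     Single-arm: returns [[site]]. Multi-arm: returns [[left/gripper], [right/gripper]].
--     """
--     ee_sites = [n for n in site_names if _is_ee_site(n)]
--     if not ee_sites:
--         return []
--     if len(ee_sites) == 1:
--         return [ee_sites]
--     # Multi-arm: group by prefix (e.g. left/, right/)
--     groups: dict[str, list[str]] = {}
--     for s in ee_sites:
--         if "/" in s:
--             prefix = s.split("/")[0] + "/"
--             groups.setdefault(prefix, []).append(s)
--         else: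
--             groups.setdefault("", []).append(s)
--     if len(groups) == 1 and "" in groups and len(groups[""]) > 1:
--         return [[s] for s in groups[""]]
--     return list(groups.values())
-- ===== SOURCE B (Python) =====
-- EE_SITE_PATTERNS = (
--     "gripper", "eetip", "hand", "attachment", "pin_site", "tool0", "ee", "ee_site",
--     "end_effector",
-- )
--
-- EE_SITE_EXCLUDE = ("left_finger", "right_finger", "/finger")
--
-- def _is_ee_site(name: str) -> bool:
--     lower = name.lower()
--     if any(ex in lower for ex in EE_SITE_EXCLUDE):
--         return False
--     return any(p in lower for p in EE_SITE_PATTERNS)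
--
-- def _prefix(s: str) -> str:
--     return s.split("/")[0] + "/" if "/" in s else ""
--
-- def _group_sites_by_arm(site_names: list[str]) -> list[list[str]]:
--     ee_sites = [n for n in site_names if _is_ee_site(n)]
--     if not ee_sites:
--         return []
--     if len(ee_sites) == 1:
--         return [ee_sites]
--     ordered = list(dict.fromkeys(_prefix(s) for s in ee_sites))
--     groups = [[s for s in ee_sites if _prefix(s) == p] for p in ordered]
--     if ordered == [""] and len(groups[0]) > 1:
--         return [[s] for s in groups[0]]
--     return groups
-- ===== Notes on version B (the rewrite author's own statement) =====
-- stated objective: alternative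
-- what changed: Replaces A's imperative dict-of-lists built by setdefault/append with an ordered-dedup pass over prefixes followed by a filter comprehension per prefix; the dict disappears.
import Mathlib
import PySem

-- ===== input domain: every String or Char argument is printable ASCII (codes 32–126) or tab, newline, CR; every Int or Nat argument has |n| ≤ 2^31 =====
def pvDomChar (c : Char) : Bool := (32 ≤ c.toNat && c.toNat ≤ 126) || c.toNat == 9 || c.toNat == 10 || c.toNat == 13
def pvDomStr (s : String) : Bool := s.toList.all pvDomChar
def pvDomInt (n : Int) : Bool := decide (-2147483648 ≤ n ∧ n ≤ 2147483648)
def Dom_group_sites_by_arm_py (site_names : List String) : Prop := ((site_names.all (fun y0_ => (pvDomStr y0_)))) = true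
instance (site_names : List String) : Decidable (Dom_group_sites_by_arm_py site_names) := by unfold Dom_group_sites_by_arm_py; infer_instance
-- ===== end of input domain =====

-- B builds the groups by an ordered dedup of prefixes plus one filter per prefix instead of A's
-- setdefault/append dict loop; same return value (objective: alternative decomposition).

-- ===== PORT A =====
def pvEePatterns : List String :=
  ["gripper", "eetip", "hand", "attachment", "pin_site", "tool0", "ee", "ee_site", "end_effector"]

def pvEeExclude : List String := ["left_finger", "right_finger", "/finger"]

-- shared module helper _is_ee_site (identical in Source A and Source B)
def pvIsEeSite (name : String) : Bool :=
  let lower := PySem.Str.lower name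
  if pvEeExclude.any (fun ex => PySem.Str.isIn ex lower) then false
  else pvEePatterns.any (fun p => PySem.Str.isIn p lower)

def group_sites_by_arm_py (site_names : List String) : List (List String) :=
  let ee_sites := site_names.filter pvIsEeSite
  if ee_sites.isEmpty then []
  else if ee_sites.length == 1 then [ee_sites]
  else
    let groups : PySem.Dict String (List String) :=
      ee_sites.foldl (fun d s =>
        if PySem.Str.isIn "/" s then
          d.modify ((((PySem.Str.split? s "/").getD []).headD "") ++ "/") [] (· ++ [s])
        else
          d.modify "" [] (· ++ [s])) PySem.Dict.empty
    if groups.size == 1 && groups.contains "" && (groups.getD "" []).length > 1 then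
      (groups.getD "" []).map (fun s => [s])
    else groups.values

-- ===== PORT B =====
-- helper _prefix of Source B
def pvPrefix (s : String) : String :=
  if PySem.Str.isIn "/" s then (((PySem.Str.split? s "/").getD []).headD "") ++ "/" else ""

def group_sites_by_arm_py_alt (site_names : List String) : List (List String) :=
  let ee_sites := site_names.filter pvIsEeSite
  if ee_sites.isEmpty then []
  else if ee_sites.length == 1 then [ee_sites]
  else
    let ordered := PySem.List.dedup (ee_sites.map pvPrefix)
    let groups := ordered.map (fun p => ee_sites.filter (fun s => pvPrefix s == p))
    if ordered == [""] && (groups.headD []).length > 1 then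
      (groups.headD []).map (fun s => [s])
    else groups

-- ===== PRECONDITION & SPEC =====
def Spec_group_sites_by_arm_py (site_names : List String) (out : List (List String)) : Prop := out = group_sites_by_arm_py_alt site_names
instance (site_names : List String) (out : List (List String)) : Decidable (Spec_group_sites_by_arm_py site_names out) := by unfold Spec_group_sites_by_arm_py; infer_instance

-- ===== CLAIM (what is proved, stated in full; the proofs are below) =====
def Claim_equal_group_sites_by_arm_py : Prop := ∀ (site_names : List String), Dom_group_sites_by_arm_py site_names → Spec_group_sites_by_arm_py site_names (group_sites_by_arm_py site_names)

-- ===== LEMMAS AND PROOFS =====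

-- the dict built by A's grouping loop, with the inline prefix expression abbreviated to pvPrefix
def pvDictOf (ee : List String) : PySem.Dict String (List String) :=
  ee.foldl (fun d s => d.modify (pvPrefix s) [] (· ++ [s])) PySem.Dict.empty

theorem pvLoop_eq (ee : List String) :
    ee.foldl (fun d s =>
        if PySem.Str.isIn "/" s then
          d.modify ((((PySem.Str.split? s "/").getD []).headD "") ++ "/") [] (· ++ [s])
        else
          d.modify "" [] (· ++ [s])) PySem.Dict.empty = pvDictOf ee := by
  unfold pvDictOf
  congr 1
  funext d s
  simp only [pvPrefix]
  split <;> rfl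

theorem pvDict_keys (ee : List String) :
    (pvDictOf ee).keys = PySem.List.dedup (ee.map pvPrefix) := by
  unfold pvDictOf
  rw [PySem.Dict.keys_foldl_modify_key ee pvPrefix [] (fun _ s v => v ++ [s])
      (PySem.Dict.empty : PySem.Dict String (List String))]
  simp [PySem.Dict.keys_empty, PySem.List.dedup_eq_ofList, PySem.Set.update, PySem.Set.ofList_eq_foldl]

theorem pvDict_getD (ee : List String) (c : String) :
    (pvDictOf ee).getD c [] = ee.filter (fun s => pvPrefix s == c) := by
  have h := PySem.Dict.getD_foldl_modify_append (ee.map (fun s => (pvPrefix s, s)))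
      (PySem.Dict.empty : PySem.Dict String (List String)) c
  rw [List.foldl_map] at h
  unfold pvDictOf
  rw [h, PySem.Dict.getD_empty]
  simp [List.filter_map, Function.comp_def]

theorem pvDict_nodup (ee : List String) : (pvDictOf ee).keys.Nodup := by
  unfold pvDictOf
  exact PySem.Dict.nodup_keys_foldl_modify_key ee pvPrefix [] (fun _ s v => v ++ [s]) _
    (by simp [PySem.Dict.keys_empty])

theorem pvDict_values (ee : List String) :
    (pvDictOf ee).values =
      (PySem.List.dedup (ee.map pvPrefix)).map (fun p => ee.filter (fun s => pvPrefix s == p)) := by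
  rw [PySem.Dict.values_eq_map_keys _ (pvDict_nodup ee) [], pvDict_keys]
  exact List.map_congr_left (fun k _ => pvDict_getD ee k)

theorem pvDict_size (ee : List String) :
    (pvDictOf ee).size = (PySem.List.dedup (ee.map pvPrefix)).length := by
  rw [← pvDict_keys]; simp [PySem.Dict.size, PySem.Dict.keys]

-- "length 1 and contains the empty string" characterises the singleton list [""]
theorem pv_len_one_mem (ks : List String) :
    (ks.length == 1 && decide ("" ∈ ks)) = (ks == [""]) := by
  match ks with
  | [] => simp
  | [a] =>
    by_cases h : a = ""
    · subst h; simp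
    · simp [h, Ne.symm h]
  | a :: b :: t => simp

-- ===== VERDICT (by name: the statement is the Claim_ definition above) =====
theorem group_sites_by_arm_py_spec : Claim_equal_group_sites_by_arm_py := by
  intro site_names _
  show group_sites_by_arm_py site_names = group_sites_by_arm_py_alt site_names
  simp only [group_sites_by_arm_py, group_sites_by_arm_py_alt]
  set ee := site_names.filter pvIsEeSite with hee
  by_cases h0 : ee.isEmpty
  · simp [h0]
  · simp only [h0, Bool.false_eq_true, if_false]
    by_cases h1 : ee.length == 1
    · simp [h1]
    · simp only [h1, Bool.false_eq_true, if_false]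
      rw [pvLoop_eq]
      set ks := PySem.List.dedup (ee.map pvPrefix) with hks
      rw [pvDict_values, pvDict_getD, pvDict_size,
          PySem.Dict.contains_eq_decide_mem_keys, pvDict_keys, ← hks, pv_len_one_mem]
      by_cases hone : ks = [""]
      · rw [hone]
        simp
      · have : (ks == [""]) = false := by simp [hone]
        simp [this]
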